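-- pv_equiv track=rewrite | github.com/SURAJMH2001/PYTHON-6TH-SEM | code/p3.py | rrc
-- ===== SOURCE A (Python) =====
-- def rrc(ips):
--     pc=""
--     currcharcnt=1
--     ops=""
--     for char in ips:
--         if char==pc:
--             currcharcnt+=1
--             if currcharcnt==3:
--                 ops=ops[:-1]+" "
--
--         else:
--             currcharcnt=1
--
--         ops+=char
--         pc=char
--     return ops
-- ===== SOURCE B (Python) =====
-- from itertools import groupby
--
-- def rrc(ips):
--     out = []
--     for c, grp in groupby(ips):
--         L = len(list(grp))
--         if L >= 3:
--             out.append(c + " " + c * (L - 2))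
--         else:
--             out.append(c * L)
--     return "".join(out)
-- ===== Notes on version B (the rewrite author's own statement) =====
-- stated objective: idiomatic
-- what changed: Replaced A's char-by-char state machine (prev-char, run counter, backpatching the last output char) by an itertools.groupby pass that rebuilds each maximal run from a closed per-run formula: for a run of length L at least 3, the char, then a space, then the char repeated L-2 times; otherwise the run unchanged.
import Mathlib
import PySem

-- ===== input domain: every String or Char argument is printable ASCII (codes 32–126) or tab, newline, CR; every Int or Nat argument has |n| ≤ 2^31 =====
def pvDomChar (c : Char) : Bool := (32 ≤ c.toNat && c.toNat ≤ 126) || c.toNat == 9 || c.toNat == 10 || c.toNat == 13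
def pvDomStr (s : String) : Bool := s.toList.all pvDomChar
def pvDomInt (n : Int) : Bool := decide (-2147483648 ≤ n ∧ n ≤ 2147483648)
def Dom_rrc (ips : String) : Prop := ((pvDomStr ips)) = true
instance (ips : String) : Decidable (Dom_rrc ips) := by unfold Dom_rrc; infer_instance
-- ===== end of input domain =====

-- B replaces A's char-by-char counter-and-backpatch state machine with a groupby-style
-- pass over maximal runs, rebuilding each run by a closed per-run formula (idiomatic).

-- ===== PORT A =====
-- state: (pc = previous char, none for the initial "", currcharcnt, ops as List Char)
def rrcLoop : List Char → Option Char → Int → List Char → List Char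
  | [], _, _, ops => ops
  | ch :: rest, pc, cnt, ops =>
    if some ch == pc then
      let cnt' := cnt + 1
      let ops' := if cnt' == 3 then ops.dropLast ++ [' '] else ops
      rrcLoop rest (some ch) cnt' (ops' ++ [ch])
    else
      rrcLoop rest (some ch) 1 (ops ++ [ch])

def rrc (ips : String) : String := String.ofList (rrcLoop ips.toList none 1 [])

-- ===== PORT B =====
-- groupby: peel the maximal leading run of the head char, emit its rebuilt form, recurse.
def rrcAltGo : List Char → List Char
  | [] => []
  | c :: rest =>
    let run := rest.takeWhile (· == c)
    let rest' := rest.dropWhile (· == c)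
    let L := run.length + 1
    (if 3 ≤ L then c :: ' ' :: List.replicate (L - 2) c else List.replicate L c) ++ rrcAltGo rest'
  termination_by l => l.length
  decreasing_by
    simp only [List.length_cons]
    exact Nat.lt_succ_of_le (List.length_dropWhile_le _ _)

def rrc_alt (ips : String) : String := String.ofList (rrcAltGo ips.toList)

-- ===== PRECONDITION & SPEC =====
def Spec_rrc (ips : String) (out : String) : Prop := out = rrc_alt ips
instance (ips : String) (out : String) : Decidable (Spec_rrc ips out) := by unfold Spec_rrc; infer_instance

-- ===== CLAIM (what is proved, stated in full; the proofs are below) =====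
def Claim_equal_rrc : Prop := ∀ (ips : String), Dom_rrc ips → Spec_rrc ips (rrc ips)

-- ===== LEMMAS AND PROOFS =====

-- the head of a dropWhile residue fails the predicate
theorem head_dropWhile_false {α : Type} (p : α → Bool) (l : List α) (d : α)
    (hd : (l.dropWhile p).head? = some d) : p d = false := by
  induction l with
  | nil => simp at hd
  | cons a as ih =>
    rw [List.dropWhile_cons] at hd
    by_cases hp : p a = true
    · simp only [hp, if_true] at hd; exact ih hd
    · have hp' : p a = false := by simpa using hp
      simp only [hp', Bool.false_eq_true, if_false, List.head?_cons, Option.some.injEq] at hd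
      subst hd
      exact hp'

-- takeWhile/dropWhile over an explicit run
theorem takeWhile_run (c : Char) (k : Nat) (rest' : List Char)
    (h : ∀ d, rest'.head? = some d → (d == c) = false) :
    (List.replicate k c ++ rest').takeWhile (· == c) = List.replicate k c ∧
    (List.replicate k c ++ rest').dropWhile (· == c) = rest' := by
  induction k with
  | zero =>
    simp only [List.replicate_zero, List.nil_append]
    cases hr : rest' with
    | nil => simp
    | cons d ds =>
      have := h d (by rw [hr]; rfl)
      simp [List.takeWhile_cons, this]
  | succ m ih =>
    simp [List.replicate_succ, List.takeWhile_cons, ih]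

-- B's rebuild of one explicit run
theorem altGo_run (c : Char) (k : Nat) (rest' : List Char)
    (h : ∀ d, rest'.head? = some d → (d == c) = false) :
    rrcAltGo (c :: (List.replicate k c ++ rest'))
      = (if 3 ≤ k + 1 then c :: ' ' :: List.replicate (k + 1 - 2) c
         else List.replicate (k + 1) c) ++ rrcAltGo rest' := by
  rw [rrcAltGo]
  simp only [(takeWhile_run c k rest' h).1, (takeWhile_run c k rest' h).2,
    List.length_replicate]

-- consuming the tail of a run once the counter has passed 3: plain appends, no backpatch
theorem rrcLoop_consume (m : Nat) (c : Char) (rest : List Char) (n : Int) (ops : List Char)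
    (hn : 3 ≤ n) :
    rrcLoop (List.replicate m c ++ rest) (some c) n ops
      = rrcLoop rest (some c) (n + m) (ops ++ List.replicate m c) := by
  induction m generalizing n ops with
  | zero => simp
  | succ k ih =>
    rw [List.replicate_succ]
    simp only [List.cons_append, rrcLoop, beq_self_eq_true, if_true]
    have h3 : (n + 1 == (3 : Int)) = false := by
      simp only [beq_eq_false_iff_ne, ne_eq]; omega
    simp only [h3, Bool.false_eq_true, if_false]
    rw [ih (n + 1) (ops ++ [c]) (by omega)]
    have h1 : n + 1 + (k : Int) = n + ((k + 1 : Nat) : Int) := by push_cast; ring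
    have h2 : ops ++ [c] ++ List.replicate k c = ops ++ List.replicate (k + 1) c := by
      simp [List.replicate_succ]
    rw [h1, h2, List.replicate_succ]

-- main invariant: from a "fresh" state (pc does not match the next char), the loop
-- appends exactly the groupby rebuild of the remaining input
theorem rrcLoop_fresh (l : List Char) (pc : Option Char) (n : Int) (ops : List Char)
    (hfresh : ∀ c, l.head? = some c → pc ≠ some c) :
    rrcLoop l pc n ops = ops ++ rrcAltGo l := by
  induction hl : l.length using Nat.strong_induction_on generalizing l pc n ops with
  | _ len ih =>
  match l with
  | [] => simp [rrcLoop, rrcAltGo]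
  | c :: rest =>
    have hpc : (some c == pc) = false := by
      have := hfresh c (by simp)
      cases pc with
      | none => rfl
      | some d =>
        simp only [beq_eq_false_iff_ne, ne_eq, Option.some.injEq]
        intro h; exact this (by rw [h])
    -- split rest into the leading run of c and the remainder
    obtain ⟨k, rest', hrest, hh⟩ :
        ∃ k rest', rest = List.replicate k c ++ rest' ∧
          (∀ d, rest'.head? = some d → (d == c) = false) := by
      refine ⟨(rest.takeWhile (· == c)).length, rest.dropWhile (· == c), ?_, ?_⟩
      · conv_lhs => rw [← List.takeWhile_append_dropWhile (p := (· == c)) (l := rest)]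
        congr 1
        apply List.eq_replicate_of_mem
        intro b hb
        have hbc := List.mem_takeWhile_imp hb
        exact eq_of_beq hbc
      · exact head_dropWhile_false _ _
    subst hrest
    have hfresh' : ∀ d, rest'.head? = some d → (some c : Option Char) ≠ some d := by
      intro d hd
      have := hh d hd
      simp only [beq_eq_false_iff_ne, ne_eq] at this
      simp only [ne_eq, Option.some.injEq]
      intro h; exact this h.symm
    have hlen' : rest'.length < len := by
      rw [← hl]
      simp only [List.length_cons, List.length_append, List.length_replicate]
      omega
    rw [altGo_run c k rest' hh]
    match k with
    | 0 =>
      simp only [List.replicate_zero, List.nil_append, rrcLoop, hpc, Bool.false_eq_true,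
        if_false]
      rw [ih rest'.length hlen' rest' (some c) 1 (ops ++ [c]) hfresh' rfl]
      simp
    | 1 =>
      simp only [List.replicate_one, List.cons_append, List.nil_append, rrcLoop, hpc,
        beq_self_eq_true, Bool.false_eq_true, if_false, if_true]
      have h2 : ((1 : Int) + 1 == 3) = false := by decide
      simp only [h2, Bool.false_eq_true, if_false]
      rw [ih rest'.length hlen' rest' (some c) (1 + 1) (ops ++ [c] ++ [c]) hfresh' rfl]
      simp [List.replicate_succ]
    | m + 2 =>
      have hshape : List.replicate (m + 2) c ++ rest'
          = c :: c :: (List.replicate m c ++ rest') := by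
        simp [List.replicate_succ]
      rw [hshape]
      simp only [rrcLoop, hpc, beq_self_eq_true, Bool.false_eq_true, if_false, if_true]
      have h2 : ((1 : Int) + 1 == 3) = false := by decide
      have h3 : ((1 : Int) + 1 + 1 == 3) = true := by decide
      simp only [h2, h3, Bool.false_eq_true, if_false, if_true]
      rw [List.dropLast_concat]
      rw [rrcLoop_consume m c rest' (1 + 1 + 1) _ (by omega)]
      rw [ih rest'.length hlen' rest' (some c) (1 + 1 + 1 + m) _ hfresh' rfl]
      have hidx : m + 2 + 1 - 2 = m + 1 := by omega
      simp [hidx, List.replicate_succ, List.append_assoc]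

-- ===== VERDICT (by name: the statement is the Claim_ definition above) =====
theorem rrc_spec : Claim_equal_rrc := by
  intro ips _
  unfold Spec_rrc rrc rrc_alt
  rw [rrcLoop_fresh ips.toList none 1 [] (by intro c _ h; cases h)]
  rfl
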